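-- pv_equiv track=rewrite | github.com/gluster/redant | tools/glusto_redant_parser.py | multi_to_single_line
-- ===== SOURCE A (Python) =====
-- def get_brc_data(line: str, brc_dict: dict, append_flag: bool) -> dict:
--     """
--     Count the occurences of parenthesis, braces and bracket components
--     in the provided lines and accordingly update the brc_dict
--     Args:
--         line (str)
--         brc_dict (dict) : Dictionary containing the count of the said values.
--         append_flag (bool) : Indicating whether the dictionary has to be
--                              re-created.
--     """
--     delimiting_char_list = ["{", "}", "[", "]", "(", ")"]
--     if not append_flag:
--         for val in delimiting_char_list:
--             brc_dict[val] = 0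
--
--     for val in delimiting_char_list:
--         val_count = line.count(val)
--         brc_dict[val] += val_count
--
--     return brc_dict
--
-- def brc_finish_check(brc_dict: dict) -> bool:
--     """
--     To check if the matching brackets, parenthesis and braces are
--     reached or not.
--     """
--     if brc_dict["{"] != brc_dict["}"]:
--         return False
--     if brc_dict["["] != brc_dict["]"]:
--         return False
--     if brc_dict["("] != brc_dict[")"]:
--         return False
--     return True
--
-- def multi_to_single_line(glusto_tc_ml_lines: list) -> list:
--     """
--     For regex to work properly, the parenthesis, brackets and braces
--     should be accounted for and hence expressions should exist on a single
--     line. this is contrary to how python strictly says but then again, we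
--     are parsing an existing code to modify it to our taste, hence the user
--     can handle the lint issues later.
--     Arg:
--         glusto_tc_ml_lines (list) : List of lines from the glusto test case
--                                     which was read. Now certain expressions,
--                                     function calls, import statements etc
--                                     go for multiple lines and exist in
--                                     different lines in this var.
--     Returns:
--         list: Expressions, function calls and import statements spanning
--               multiple lines are now in one single line.
--     """
--     brc_dict_val = {}
--     itr = 0
--     optimized_code = []
--     append_flag = False
--     mainline = ""
--     tot_lines = len(glusto_tc_ml_lines)
--     while itr < tot_lines:
--         if not append_flag:
--             brc_dict_val = {}
--         brc_dict_val = get_brc_data(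
--             glusto_tc_ml_lines[itr], brc_dict_val, append_flag)
--         if append_flag:
--             line_value = glusto_tc_ml_lines[itr].lstrip()
--             mainline = (f"{mainline}{line_value}")
--         else:
--             mainline = (f"{glusto_tc_ml_lines[itr]}")
--         if brc_finish_check(brc_dict_val):
--             optimized_code.append(mainline)
--             append_flag = False
--         else:
--             append_flag = True
--         itr += 1
--
--     return optimized_code
-- ===== SOURCE B (Python) =====
-- def multi_to_single_line(glusto_tc_ml_lines: list) -> list:
--     """Merge bracket-spanning lines: single pass with one string buffer,
--     rescanning the buffer for balance instead of keeping per-char counts."""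
--     optimized_code = []
--     buf = None
--     for line in glusto_tc_ml_lines:
--         buf = line if buf is None else buf + line.lstrip()
--         if (buf.count("{") == buf.count("}")
--                 and buf.count("[") == buf.count("]")
--                 and buf.count("(") == buf.count(")")):
--             optimized_code.append(buf)
--             buf = None
--     return optimized_code
-- ===== Notes on version B (the rewrite author's own statement) =====
-- stated objective: simpler
-- what changed: Replaced the three-function design (persistent per-bracket count dict, append_flag, separate finish-check) with a single loop keeping one Optional buffer string that is rescanned for bracket balance, eliminating get_brc_data, brc_finish_check and all persisted loop state.
import Mathlib
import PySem

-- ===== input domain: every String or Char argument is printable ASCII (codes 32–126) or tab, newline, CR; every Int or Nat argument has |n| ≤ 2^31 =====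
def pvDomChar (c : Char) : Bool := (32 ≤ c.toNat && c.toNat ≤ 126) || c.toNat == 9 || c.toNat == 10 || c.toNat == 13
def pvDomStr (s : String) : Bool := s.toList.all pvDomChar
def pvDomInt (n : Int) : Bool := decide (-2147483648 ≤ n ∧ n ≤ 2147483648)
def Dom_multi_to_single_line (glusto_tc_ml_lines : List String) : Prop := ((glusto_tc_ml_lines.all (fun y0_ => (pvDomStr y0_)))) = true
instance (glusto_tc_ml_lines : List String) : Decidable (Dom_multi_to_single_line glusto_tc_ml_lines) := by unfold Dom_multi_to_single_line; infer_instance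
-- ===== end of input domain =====

-- B replaces A's three-function design (count dict + append_flag + finish check) with one
-- loop over the lines keeping a single optional buffer string that is rescanned for balance
-- (objective: simpler; not faster).

-- ===== PORT A =====
-- strings are handled as List Char (PySem.Chars) throughout both ports
def pvDelims : List Char := ['{', '}', '[', ']', '(', ')']

def get_brc_data (line : List Char) (brc_dict : PySem.Dict Char Int) (append_flag : Bool) :
    PySem.Dict Char Int :=
  let d := if !append_flag then pvDelims.foldl (fun d v => d.insert v 0) brc_dict else brc_dict
  pvDelims.foldl (fun d v => d.insert v (d.getD v 0 + (PySem.Chars.count line [v] : Int))) d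

def brc_finish_check (brc_dict : PySem.Dict Char Int) : Bool :=
  if brc_dict.getD '{' 0 ≠ brc_dict.getD '}' 0 then false
  else if brc_dict.getD '[' 0 ≠ brc_dict.getD ']' 0 then false
  else if brc_dict.getD '(' 0 ≠ brc_dict.getD ')' 0 then false
  else true

-- the while-loop of A, one step per line, with A's four state variables
def mtslLoop : List String → PySem.Dict Char Int → Bool → List Char → List String → List String
  | [], _, _, _, optimized_code => optimized_code
  | l :: rest, brc_dict_val, append_flag, mainline, optimized_code =>
    let d1 := if !append_flag then PySem.Dict.empty else brc_dict_val
    let d2 := get_brc_data l.toList d1 append_flag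
    let m := if append_flag then mainline ++ PySem.Chars.lstrip l.toList else l.toList
    if brc_finish_check d2 then
      mtslLoop rest d2 false m (optimized_code ++ [String.mk m])
    else
      mtslLoop rest d2 true m optimized_code

def multi_to_single_line (glusto_tc_ml_lines : List String) : List String :=
  mtslLoop glusto_tc_ml_lines PySem.Dict.empty false [] []

-- ===== PORT B =====
def pvBalanced (buf : List Char) : Bool :=
  PySem.Chars.count buf ['{'] == PySem.Chars.count buf ['}'] &&
  (PySem.Chars.count buf ['['] == PySem.Chars.count buf [']'] &&
   PySem.Chars.count buf ['('] == PySem.Chars.count buf [')'])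

def mtslStep (st : Option (List Char) × List String) (l : String) :
    Option (List Char) × List String :=
  let buf := match st.1 with
    | none => l.toList
    | some b => b ++ PySem.Chars.lstrip l.toList
  if pvBalanced buf then (none, st.2 ++ [String.mk buf]) else (some buf, st.2)

def multi_to_single_line_alt (glusto_tc_ml_lines : List String) : List String :=
  (glusto_tc_ml_lines.foldl mtslStep (none, [])).2

-- ===== PRECONDITION & SPEC =====
def Spec_multi_to_single_line (glusto_tc_ml_lines : List String) (out : List String) : Prop := out = multi_to_single_line_alt glusto_tc_ml_lines
instance (glusto_tc_ml_lines : List String) (out : List String) : Decidable (Spec_multi_to_single_line glusto_tc_ml_lines out) := by unfold Spec_multi_to_single_line; infer_instance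

-- ===== CLAIM (what is proved, stated in full; the proofs are below) =====
def Claim_equal_multi_to_single_line : Prop := ∀ (glusto_tc_ml_lines : List String), Dom_multi_to_single_line glusto_tc_ml_lines → Spec_multi_to_single_line glusto_tc_ml_lines (multi_to_single_line glusto_tc_ml_lines)

-- ===== LEMMAS AND PROOFS =====

-- s.count(c) for a one-character needle is List.count
theorem pv_count_go_single (c : Char) :
    ∀ (fuel : Nat) (s : List Char) (acc : Nat), s.length ≤ fuel →
      PySem.Chars.count.go [c] fuel s acc = acc + s.count c := by
  intro fuel
  induction fuel with
  | zero =>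
    intro s acc h
    have : s = [] := List.eq_nil_of_length_eq_zero (Nat.le_zero.mp h)
    subst this
    simp [PySem.Chars.count.go]
  | succ n ih =>
    intro s acc h
    cases s with
    | nil => simp [PySem.Chars.count.go]
    | cons hd t =>
      by_cases hc : hd = c
      · subst hc
        simp only [PySem.Chars.count.go, List.isPrefixOf, BEq.rfl, Bool.and_true,
          List.length_cons, List.length_nil, List.drop_succ_cons, List.drop_zero, if_pos]
        rw [ih t (acc + 1) (by simpa using h)]
        simp [List.count_cons]
        omega
      · have hb : (c == hd) = false := by simp [beq_iff_eq]; exact fun h' => hc h'.symm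
        simp only [PySem.Chars.count.go, List.isPrefixOf, hb, Bool.false_and, if_neg,
          Bool.false_eq_true, not_false_iff]
        rw [ih t acc (by simpa using Nat.le_of_succ_le_succ (by simpa using h))]
        simp [List.count_cons, hc]

theorem pv_count_single (s : List Char) (c : Char) :
    PySem.Chars.count s [c] = s.count c := by
  simp [PySem.Chars.count, List.isEmpty]
  simpa using pv_count_go_single c s.length s 0 le_rfl

-- lstrip only removes whitespace, so it preserves the count of any non-space character
theorem pv_count_lstrip (s : List Char) (c : Char) (hc : PySem.Chars.isspace c = false) :
    (PySem.Chars.lstrip s).count c = s.count c := by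
  unfold PySem.Chars.lstrip
  induction s with
  | nil => simp
  | cons hd t ih =>
    by_cases hsp : PySem.Chars.isspace hd
    · have hne : hd ≠ c := fun h => by rw [h] at hsp; rw [hc] at hsp; exact Bool.false_ne_true hsp
      simp only [List.dropWhile_cons, hsp, if_true, ih]
      simp [List.count_cons, hne]
    · simp [List.dropWhile_cons, hsp]

theorem pv_delims_not_space (c : Char) (hc : c ∈ pvDelims) :
    PySem.Chars.isspace c = false := by
  fin_cases hc <;> decide

-- what get_brc_data does to the six tracked counts
theorem pv_gbd_false (l : List Char) (d : PySem.Dict Char Int) (c : Char) (hc : c ∈ pvDelims) :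
    (get_brc_data l d false).getD c 0 = (l.count c : Int) := by
  fin_cases hc <;>
    simp [get_brc_data, pvDelims, List.foldl, PySem.Dict.getD_insert, pv_count_single]

theorem pv_gbd_true (l : List Char) (d : PySem.Dict Char Int) (c : Char) (hc : c ∈ pvDelims) :
    (get_brc_data l d true).getD c 0 = d.getD c 0 + (l.count c : Int) := by
  fin_cases hc <;>
    simp [get_brc_data, pvDelims, List.foldl, PySem.Dict.getD_insert, pv_count_single]

-- the finish check on a dict holding m's counts is B's balance test on m
theorem pv_check_eq_balanced (d : PySem.Dict Char Int) (m : List Char)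
    (h : ∀ c ∈ pvDelims, d.getD c 0 = (m.count c : Int)) :
    brc_finish_check d = pvBalanced m := by
  have h1 := h '{' (by simp [pvDelims]); have h2 := h '}' (by simp [pvDelims])
  have h3 := h '[' (by simp [pvDelims]); have h4 := h ']' (by simp [pvDelims])
  have h5 := h '(' (by simp [pvDelims]); have h6 := h ')' (by simp [pvDelims])
  simp [brc_finish_check, pvBalanced, h1, h2, h3, h4, h5, h6, pv_count_single,
    Int.natCast_inj]
  by_cases e1 : m.count '{' = m.count '}' <;>
    by_cases e2 : m.count '[' = m.count ']' <;>
      by_cases e3 : m.count '(' = m.count ')' <;>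
        simp [e1, e2, e3]

-- loop invariant: A's state (dict, flag, mainline) corresponds to B's optional buffer
theorem pv_loop_eq : ∀ (lines : List String) (d : PySem.Dict Char Int) (flag : Bool)
    (mainline : List Char) (acc : List String),
    (flag = true → ∀ c ∈ pvDelims, d.getD c 0 = (mainline.count c : Int)) →
    mtslLoop lines d flag mainline acc
      = (lines.foldl mtslStep ((if flag then some mainline else none), acc)).2 := by
  intro lines
  induction lines with
  | nil => intro d flag mainline acc _; simp [mtslLoop]
  | cons l rest ih =>
    intro d flag mainline acc hinv
    cases flag with
    | false =>
      simp only [mtslLoop, Bool.not_false, List.foldl_cons, mtslStep, Bool.false_eq_true, reduceIte, if_false, if_true]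
      have hcnt : ∀ c ∈ pvDelims,
          (get_brc_data l.toList PySem.Dict.empty false).getD c 0 = (l.toList.count c : Int) :=
        fun c hc => pv_gbd_false l.toList PySem.Dict.empty c hc
      rw [pv_check_eq_balanced _ l.toList hcnt]
      by_cases hb : pvBalanced l.toList = true
      · simp only [hb, if_true]
        rw [ih _ false _ _ (by simp)]; simp [hb]
      · simp only [Bool.not_eq_true] at hb
        simp only [hb, Bool.false_eq_true, if_false]
        rw [ih _ true _ _ (fun _ => hcnt)]; simp [hb]
    | true =>
      simp only [mtslLoop, Bool.not_true, List.foldl_cons, mtslStep, Bool.false_eq_true, reduceIte, if_false, if_true]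
      have hcnt : ∀ c ∈ pvDelims,
          (get_brc_data l.toList d true).getD c 0
            = ((mainline ++ PySem.Chars.lstrip l.toList).count c : Int) := by
        intro c hc
        rw [pv_gbd_true l.toList d c hc, hinv rfl c hc, List.count_append,
          pv_count_lstrip l.toList c (pv_delims_not_space c hc)]
        push_cast; ring
      rw [pv_check_eq_balanced _ (mainline ++ PySem.Chars.lstrip l.toList) hcnt]
      by_cases hb : pvBalanced (mainline ++ PySem.Chars.lstrip l.toList) = true
      · simp only [hb, if_true]
        rw [ih _ false _ _ (by simp)]; simp [hb]
      · simp only [Bool.not_eq_true] at hb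
        simp only [hb, Bool.false_eq_true, if_false]
        rw [ih _ true _ _ (fun _ => hcnt)]; simp [hb]

-- ===== VERDICT (by name: the statement is the Claim_ definition above) =====
theorem multi_to_single_line_spec : Claim_equal_multi_to_single_line := by
  intro lines _
  unfold Spec_multi_to_single_line multi_to_single_line multi_to_single_line_alt
  rw [pv_loop_eq lines PySem.Dict.empty false [] [] (by simp)]; simp
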